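-- pv_equiv track=rewrite | github.com/dkmvfabio/esercizi_python | es1Verifica.py | match_meno_combattuto
-- ===== SOURCE A (Python) =====
-- def match_meno_combattuto(tupla_partite):
--     match_piu_combattuti = []
--     min = float('inf')
--
--     for giocatore1, giocatore2, set1, set2 in tupla_partite:
--         somma = set1 + set2
--         if (somma < min):
--             min = somma
--
--     for giocatore1, giocatore2, set1, set2 in tupla_partite:
--         somma = set1 + set2
--         if (min == somma):
--             match_piu_combattuti.append(giocatore1)
--             match_piu_combattuti.append(giocatore2)
--             match_piu_combattuti.append(set1)
--             match_piu_combattuti.append(set2)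
--     return f"Il/I match meno combattito/i sono: {match_piu_combattuti}, con un punteggio minimo di {min}"
-- ===== SOURCE B (Python) =====
-- def match_meno_combattuto(tupla_partite):
--     minimo = float('inf')
--     risultato = []
--     for giocatore1, giocatore2, set1, set2 in tupla_partite:
--         somma = set1 + set2
--         if somma < minimo:
--             minimo = somma
--             risultato = [giocatore1, giocatore2, set1, set2]
--         elif somma == minimo:
--             risultato += [giocatore1, giocatore2, set1, set2]
--     return f"Il/I match meno combattito/i sono: {risultato}, con un punteggio minimo di {minimo}"
-- ===== Notes on version B (the rewrite author's own statement) =====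
-- stated objective: faster
-- what changed: Replaces A's two passes (one to find the minimum set sum, one to collect all matches with that sum) by a single pass that keeps the running minimum and resets the collected list whenever a strictly smaller sum appears.
import Mathlib
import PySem

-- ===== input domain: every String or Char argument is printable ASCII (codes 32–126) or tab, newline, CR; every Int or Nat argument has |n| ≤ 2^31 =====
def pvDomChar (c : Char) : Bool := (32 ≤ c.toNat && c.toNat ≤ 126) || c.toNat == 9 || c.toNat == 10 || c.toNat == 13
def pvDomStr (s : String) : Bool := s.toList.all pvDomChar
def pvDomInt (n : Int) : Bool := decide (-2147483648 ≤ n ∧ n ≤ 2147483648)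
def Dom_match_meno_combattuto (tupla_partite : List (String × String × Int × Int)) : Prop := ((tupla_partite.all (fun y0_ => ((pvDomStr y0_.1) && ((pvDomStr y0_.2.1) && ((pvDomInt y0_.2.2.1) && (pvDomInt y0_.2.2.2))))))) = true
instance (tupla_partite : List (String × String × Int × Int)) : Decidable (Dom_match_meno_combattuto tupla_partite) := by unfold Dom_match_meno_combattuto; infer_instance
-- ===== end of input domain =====

-- B replaces A's two passes by a single pass keeping the running minimum and resetting the
-- collected list on each strict improvement (objective: constant-factor speed, one pass).

-- shared formatting helpers: the f-string "… {list} … {min}" of both Pythons.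
-- Python's repr of a str, exact for the printable-ASCII + tab/newline/CR characters of Dom_.
def pvEscChar (q : Char) (c : Char) : List Char :=
  if c = '\\' then ['\\', '\\']
  else if c = Char.ofNat 10 then ['\\', 'n']
  else if c = Char.ofNat 13 then ['\\', 'r']
  else if c = Char.ofNat 9 then ['\\', 't']
  else if c = q then ['\\', q]
  else [c]

def pvStrRepr (s : String) : String :=
  let cs := s.toList
  let q : Char := if ('\'' ∈ cs) ∧ ¬ ('"' ∈ cs) then '"' else '\''
  String.ofList ((q :: cs.flatMap (pvEscChar q)) ++ [q])

def pvItemRepr : String ⊕ Int → String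
  | .inl s => pvStrRepr s
  | .inr n => PySem.Int.toStr n

def pvListRepr (xs : List (String ⊕ Int)) : String :=
  "[" ++ String.intercalate ", " (xs.map pvItemRepr) ++ "]"

-- min starts as float('inf'); none models inf (prints "inf", every int is smaller, equals no int)
def pvMinRepr : Option Int → String
  | none => "inf"
  | some m => PySem.Int.toStr m

def pvItems (p : String × String × Int × Int) : List (String ⊕ Int) :=
  [Sum.inl p.1, Sum.inl p.2.1, Sum.inr p.2.2.1, Sum.inr p.2.2.2]

-- ===== PORT A =====
def pvMinStep (m : Option Int) (p : String × String × Int × Int) : Option Int :=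
  let somma := p.2.2.1 + p.2.2.2
  match m with
  | none => some somma              -- somma < inf is always true
  | some v => if somma < v then some somma else some v

def pvCollectStep (min : Option Int) (acc : List (String ⊕ Int))
    (p : String × String × Int × Int) : List (String ⊕ Int) :=
  let somma := p.2.2.1 + p.2.2.2
  if min = some somma then acc ++ pvItems p else acc

def match_meno_combattuto (tupla_partite : List (String × String × Int × Int)) : String :=
  let min := tupla_partite.foldl pvMinStep none
  let match_piu_combattuti := tupla_partite.foldl (pvCollectStep min) []
  "Il/I match meno combattito/i sono: " ++ pvListRepr match_piu_combattuti
    ++ ", con un punteggio minimo di " ++ pvMinRepr min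

-- ===== PORT B =====
def pvBStep (st : Option Int × List (String ⊕ Int)) (p : String × String × Int × Int) :
    Option Int × List (String ⊕ Int) :=
  let somma := p.2.2.1 + p.2.2.2
  match st.1 with
  | none => (some somma, pvItems p)
  | some v =>
    if somma < v then (some somma, pvItems p)
    else if somma = v then (some v, st.2 ++ pvItems p)
    else st

def match_meno_combattuto_alt (tupla_partite : List (String × String × Int × Int)) : String :=
  let st := tupla_partite.foldl pvBStep (none, [])
  "Il/I match meno combattito/i sono: " ++ pvListRepr st.2
    ++ ", con un punteggio minimo di " ++ pvMinRepr st.1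

-- ===== PRECONDITION & SPEC =====
def Spec_match_meno_combattuto (tupla_partite : List (String × String × Int × Int)) (out : String) : Prop := out = match_meno_combattuto_alt tupla_partite
instance (tupla_partite : List (String × String × Int × Int)) (out : String) : Decidable (Spec_match_meno_combattuto tupla_partite out) := by unfold Spec_match_meno_combattuto; infer_instance

-- ===== CLAIM (what is proved, stated in full; the proofs are below) =====
def Claim_equal_match_meno_combattuto : Prop := ∀ (tupla_partite : List (String × String × Int × Int)), Dom_match_meno_combattuto tupla_partite → Spec_match_meno_combattuto tupla_partite (match_meno_combattuto tupla_partite)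

-- ===== LEMMAS AND PROOFS =====

theorem pvMin_some_le : ∀ (xs : List (String × String × Int × Int)) (v m : Int),
    xs.foldl pvMinStep (some v) = some m →
    m ≤ v ∧ ∀ p ∈ xs, m ≤ p.2.2.1 + p.2.2.2 := by
  intro xs
  induction xs with
  | nil => intro v m h; simp [List.foldl] at h; simp [h]
  | cons p xs ih =>
    intro v m h
    simp only [List.foldl, pvMinStep] at h
    by_cases hc : p.2.2.1 + p.2.2.2 < v
    · rw [if_pos hc] at h
      obtain ⟨h1, h2⟩ := ih _ _ h
      refine ⟨by omega, ?_⟩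
      intro q hq
      rcases List.mem_cons.mp hq with rfl | hq
      · omega
      · exact h2 q hq
    · rw [if_neg hc] at h
      obtain ⟨h1, h2⟩ := ih _ _ h
      refine ⟨h1, ?_⟩
      intro q hq
      rcases List.mem_cons.mp hq with rfl | hq
      · omega
      · exact h2 q hq

theorem pvMin_isSome : ∀ (xs : List (String × String × Int × Int)) (v : Int),
    (xs.foldl pvMinStep (some v)).isSome := by
  intro xs
  induction xs with
  | nil => intro v; simp [List.foldl]
  | cons p xs ih =>
    intro v
    simp only [List.foldl, pvMinStep]
    by_cases hc : p.2.2.1 + p.2.2.2 < v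
    · rw [if_pos hc]; exact ih _
    · rw [if_neg hc]; exact ih _

theorem pvMin_none_le (xs : List (String × String × Int × Int)) (m : Int)
    (h : xs.foldl pvMinStep none = some m) :
    ∀ p ∈ xs, m ≤ p.2.2.1 + p.2.2.2 := by
  cases xs with
  | nil => simp [List.foldl] at h
  | cons p xs =>
    simp only [List.foldl, pvMinStep] at h
    obtain ⟨h1, h2⟩ := pvMin_some_le xs _ m h
    intro q hq
    rcases List.mem_cons.mp hq with rfl | hq
    · exact h1
    · exact h2 q hq

theorem pvCollect_nil (xs : List (String × String × Int × Int)) (t : Option Int)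
    (h : ∀ p ∈ xs, t ≠ some (p.2.2.1 + p.2.2.2)) :
    xs.foldl (pvCollectStep t) [] = [] := by
  induction xs with
  | nil => simp [List.foldl]
  | cons p xs ih =>
    simp only [List.foldl, pvCollectStep]
    rw [if_neg (h p (by simp))]
    exact ih (fun q hq => h q (by simp [hq]))

theorem pvB_eq_A (xs : List (String × String × Int × Int)) :
    xs.foldl pvBStep (none, []) =
      (xs.foldl pvMinStep none, xs.foldl (pvCollectStep (xs.foldl pvMinStep none)) []) := by
  induction xs using List.reverseRecOn with
  | nil => rfl
  | append_singleton xs x ih =>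
    rw [List.foldl_append, ih, List.foldl_append, List.foldl_append]
    rcases hMcase : xs.foldl pvMinStep none with _ | v
    · -- min still none after the fold forces xs = []
      have hxs : xs = [] := by
        cases xs with
        | nil => rfl
        | cons p ys =>
          exfalso
          have hs := pvMin_isSome ys (p.2.2.1 + p.2.2.2)
          simp only [List.foldl, pvMinStep] at hMcase
          rw [hMcase] at hs
          simp at hs
      subst hxs
      simp [pvBStep, pvMinStep, pvCollectStep, List.foldl]
    · have hle := pvMin_none_le xs v hMcase
      simp only [List.foldl]
      by_cases h1 : x.2.2.1 + x.2.2.2 < v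
      · -- strict improvement: B resets; A's collection at the new min over xs is empty
        have hempty : xs.foldl (pvCollectStep (some (x.2.2.1 + x.2.2.2))) [] = [] := by
          apply pvCollect_nil
          intro p hp hcontra
          have := hle p hp
          simp at hcontra
          omega
        simp [pvBStep, pvMinStep, pvCollectStep, if_pos h1, hempty]
      · by_cases h2 : x.2.2.1 + x.2.2.2 = v
        · -- tie: both extend the collected list
          simp [pvBStep, pvMinStep, pvCollectStep, h2]
        · -- worse: both leave state unchanged
          have hne : ¬ (some v = some (x.2.2.1 + x.2.2.2)) := by
            simp; omega
          simp [pvBStep, pvMinStep, pvCollectStep, if_neg h1, if_neg h2, hne]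

-- ===== VERDICT (by name: the statement is the Claim_ definition above) =====
theorem match_meno_combattuto_spec : Claim_equal_match_meno_combattuto := by
  intro xs _
  unfold Spec_match_meno_combattuto match_meno_combattuto match_meno_combattuto_alt
  rw [pvB_eq_A]
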